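-- pv_equiv track=rewrite | github.com/staffanm/code-phoropter | tools/analyze_glyphs.py | chars_to_unicode_ranges
-- ===== SOURCE A (Python) =====
-- def chars_to_unicode_ranges(chars):
--     """Convert set of characters to unicode range strings."""
--     # Sort by codepoint
--     codepoints = sorted([ord(c) for c in chars])
--
--     # Group into ranges
--     ranges = []
--     if not codepoints:
--         return ranges
--
--     start = codepoints[0]
--     end = codepoints[0]
--
--     for cp in codepoints[1:]:
--         if cp == end + 1:
--             # Consecutive, extend range
--             end = cp
--         else:
--             # Gap, save current range and start new one
--             ranges.append((start, end))
--             start = cp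
--             end = cp
--
--     # Add final range
--     ranges.append((start, end))
--
--     return ranges
-- ===== SOURCE B (Python) =====
-- def chars_to_unicode_ranges(chars):
--     """Convert set of characters to unicode range strings."""
--     codepoints = sorted([ord(c) for c in chars])
--     ranges = []
--     # Build the range list back-to-front: walk codepoints right-to-left and
--     # either extend the first range downward or prepend a new singleton range.
--     for cp in reversed(codepoints):
--         if ranges and ranges[0][0] == cp + 1:
--             ranges[0] = (cp, ranges[0][1])
--         else:
--             ranges.insert(0, (cp, cp))
--     return ranges
-- ===== Notes on version B (the rewrite author's own statement) =====
-- stated objective: alternative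
-- what changed: Replaces A's start/end/gap state machine (left-to-right with a trailing final append) by a right-to-left pass that builds the output directly, merging each codepoint into the front range or prepending a new singleton; no start/end variables and no special final step.
import Mathlib
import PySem

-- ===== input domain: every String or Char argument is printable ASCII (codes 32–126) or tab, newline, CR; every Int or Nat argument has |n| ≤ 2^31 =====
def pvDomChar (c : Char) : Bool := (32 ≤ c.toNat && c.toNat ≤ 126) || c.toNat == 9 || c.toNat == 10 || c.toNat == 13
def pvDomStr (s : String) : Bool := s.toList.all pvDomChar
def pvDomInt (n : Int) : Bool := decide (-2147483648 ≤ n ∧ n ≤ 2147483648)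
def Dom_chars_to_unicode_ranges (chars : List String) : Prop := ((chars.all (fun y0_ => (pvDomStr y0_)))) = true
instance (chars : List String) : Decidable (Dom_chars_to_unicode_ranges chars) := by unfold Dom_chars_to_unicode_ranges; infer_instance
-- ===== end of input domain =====

-- B builds the same sorted-codepoint ranges back-to-front (merge into front range or prepend a
-- singleton) instead of A's start/end/gap state machine; same cost, different decomposition.

-- ===== PORT A =====
-- ord(c) on a length-1 string (Pre_ guarantees length 1): head of the char list, as Int
def pvOrd (c : String) : Int := ((c.toList.headD ' ').toNat : Int)

def chars_to_unicode_ranges (chars : List String) : List (Int × Int) :=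
  let codepoints := PySem.List.sorted (chars.map pvOrd) (fun x => x) false
  match codepoints with
  | [] => []
  | c0 :: rest =>
    -- state (start, end, ranges), exactly A's loop over codepoints[1:]
    let st := rest.foldl
      (fun (st : Int × Int × List (Int × Int)) cp =>
        if cp = st.2.1 + 1 then (st.1, cp, st.2.2)
        else (cp, cp, st.2.2 ++ [(st.1, st.2.1)]))
      (c0, c0, [])
    st.2.2 ++ [(st.1, st.2.1)]

-- ===== PORT B =====
-- one step of B's reversed loop: merge cp into the front range or prepend (cp, cp)
def pvStep (cp : Int) (ranges : List (Int × Int)) : List (Int × Int) :=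
  match ranges with
  | (s, e) :: rest => if s = cp + 1 then (cp, e) :: rest else (cp, cp) :: (s, e) :: rest
  | [] => [(cp, cp)]

def chars_to_unicode_ranges_alt (chars : List String) : List (Int × Int) :=
  -- 'for cp in reversed(codepoints): ranges = pvStep cp ranges' is a right fold
  (PySem.List.sorted (chars.map pvOrd) (fun x => x) false).foldr pvStep []

-- ===== PRECONDITION & SPEC =====
-- Pre_ excludes inputs containing a string whose length is not 1: ord(c) raises TypeError there.
def Pre_chars_to_unicode_ranges (chars : List String) : Prop :=
  ∀ c ∈ chars, c.toList.length = 1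
instance (chars : List String) : Decidable (Pre_chars_to_unicode_ranges chars) := by
  unfold Pre_chars_to_unicode_ranges; infer_instance

def pvWitness_chars_to_unicode_ranges : List String := ["b", "a", "c", "x", "a"]

def Spec_chars_to_unicode_ranges (chars : List String) (out : List (Int × Int)) : Prop :=
  out = chars_to_unicode_ranges_alt chars
instance (chars : List String) (out : List (Int × Int)) : Decidable (Spec_chars_to_unicode_ranges chars out) := by
  unfold Spec_chars_to_unicode_ranges; infer_instance

-- ===== CLAIM (what is proved, stated in full; the proofs are below) =====
def Claim_equal_chars_to_unicode_ranges : Prop := ∀ (chars : List String), Dom_chars_to_unicode_ranges chars → Pre_chars_to_unicode_ranges chars → Spec_chars_to_unicode_ranges chars (chars_to_unicode_ranges chars)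

-- ===== LEMMAS AND PROOFS =====

-- closing A's state (start, end) against an already-folded suffix result
def pvMerge (s e : Int) (r : List (Int × Int)) : List (Int × Int) :=
  match r with
  | (s', e') :: rr => if s' = e + 1 then (s, e') :: rr else (s, e) :: (s', e') :: rr
  | [] => [(s, e)]

theorem pvStep_eq_merge (cp : Int) (r : List (Int × Int)) : pvStep cp r = pvMerge cp cp r := by
  cases r with
  | nil => rfl
  | cons p rr => cases p; rfl

theorem pvMerge_head (s e : Int) (r : List (Int × Int)) :
    ∃ e' rr, pvMerge s e r = (s, e') :: rr := by
  cases r with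
  | nil => exact ⟨e, [], rfl⟩
  | cons p rr =>
    cases p with
    | mk s' e' =>
      by_cases h : s' = e + 1
      · exact ⟨e', rr, by simp [pvMerge, h]⟩
      · exact ⟨e, (s', e') :: rr, by simp [pvMerge, h]⟩

theorem pvMerge_merge (s e cp : Int) (h : cp = e + 1) (r : List (Int × Int)) :
    pvMerge s e (pvMerge cp cp r) = pvMerge s cp r := by
  cases r with
  | nil => simp [pvMerge, h]
  | cons p rr =>
    cases p with
    | mk s' e' =>
      subst h
      by_cases h' : s' = e + 1 + 1 <;> simp [pvMerge, h']

theorem pvMerge_skip (s e cp : Int) (h : ¬ cp = e + 1) (r : List (Int × Int)) :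
    pvMerge s e (pvMerge cp cp r) = (s, e) :: pvMerge cp cp r := by
  obtain ⟨e', rr, hm⟩ := pvMerge_head cp cp r
  rw [hm]; simp [pvMerge, h]

-- the key invariant: A's loop from state (s, e, acc) over l equals acc ++ B's fold closed by (s, e)
theorem loop_eq_foldr (l : List Int) : ∀ (s e : Int) (acc : List (Int × Int)),
    (let st := l.foldl
      (fun (st : Int × Int × List (Int × Int)) cp =>
        if cp = st.2.1 + 1 then (st.1, cp, st.2.2)
        else (cp, cp, st.2.2 ++ [(st.1, st.2.1)]))
      (s, e, acc)
     st.2.2 ++ [(st.1, st.2.1)]) = acc ++ pvMerge s e (l.foldr pvStep []) := by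
  induction l with
  | nil => intro s e acc; simp [pvMerge]
  | cons cp t ih =>
    intro s e acc
    simp only [List.foldl_cons, List.foldr_cons, pvStep_eq_merge]
    by_cases h : cp = e + 1
    · subst h
      rw [if_pos rfl, ih, pvMerge_merge s e (e + 1) rfl]
    · rw [if_neg h, ih, pvMerge_skip s e cp h]
      simp

-- ===== VERDICT (by name: the statement is the Claim_ definition above) =====
theorem chars_to_unicode_ranges_spec : Claim_equal_chars_to_unicode_ranges := by
  intro chars _ _
  unfold Spec_chars_to_unicode_ranges chars_to_unicode_ranges chars_to_unicode_ranges_alt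
  cases hs : PySem.List.sorted (chars.map pvOrd) (fun x => x) false with
  | nil => simp
  | cons c0 rest =>
    simp only [List.foldr_cons, pvStep_eq_merge]
    have := loop_eq_foldr rest c0 c0 []
    simp only [List.nil_append] at this
    exact this
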